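-- pv_equiv track=rewrite | github.com/AxtonH/UtilizationDashboard | backend/app/routes/creatives.py | _infer_account_type
-- ===== SOURCE A (Python) =====
-- from typing import Any, Dict, Iterable, List, Mapping, Optional, Set, Tuple
--
-- def _infer_account_type(tags: Iterable[Any] | None) -> str:
--     if not tags:
--         return "non-key"
--     normalized_tags: List[str] = []
--     for tag in tags:
--         if isinstance(tag, str):
--             normalized_tags.append(tag.strip().lower())
--     for value in normalized_tags:
--         if "non-key" in value or "non key" in value:
--             return "non-key"
--     for value in normalized_tags:
--         if "key account" in value:
--             return "key"
--     return "non-key"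
-- ===== SOURCE B (Python) =====
-- def _infer_account_type(tags):
--     if not tags:
--         return "non-key"
--     found_key = False
--     for tag in tags:
--         if not isinstance(tag, str):
--             continue
--         value = tag.strip().lower()
--         if "non-key" in value or "non key" in value:
--             return "non-key"
--         if "key account" in value:
--             found_key = True
--     return "key" if found_key else "non-key"
-- ===== Notes on version B (the rewrite author's own statement) =====
-- stated objective: simpler
-- what changed: Replaces the three-pass structure (build normalized list, scan for non-key, scan for key) with a single pass over the tags that normalizes each tag once, returns 'non-key' immediately on a non-key match, and tracks a found_key flag.
import Mathlib
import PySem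

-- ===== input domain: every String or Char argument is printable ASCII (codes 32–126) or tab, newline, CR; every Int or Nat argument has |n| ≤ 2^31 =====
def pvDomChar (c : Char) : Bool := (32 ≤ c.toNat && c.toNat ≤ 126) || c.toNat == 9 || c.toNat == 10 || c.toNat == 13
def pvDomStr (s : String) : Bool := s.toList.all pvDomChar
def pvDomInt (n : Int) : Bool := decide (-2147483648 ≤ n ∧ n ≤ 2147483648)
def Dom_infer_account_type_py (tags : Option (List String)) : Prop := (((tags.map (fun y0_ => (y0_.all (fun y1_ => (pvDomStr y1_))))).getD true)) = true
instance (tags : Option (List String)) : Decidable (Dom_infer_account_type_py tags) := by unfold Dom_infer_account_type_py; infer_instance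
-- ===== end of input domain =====

-- B replaces A's three passes (normalize all tags, scan for non-key, scan for key) by one
-- pass with a found_key flag; simpler, same return value everywhere.


-- ===== PORT A =====
-- "non-key" in value or "non key" in value
def pvIsNonKey (v : String) : Bool :=
  PySem.Str.isIn "non-key" v || PySem.Str.isIn "non key" v

-- A: build the normalized list, then scan it for a non-key match, then for a key match.
def infer_account_type_py (tags : Option (List String)) : String :=
  match tags with
  | none => "non-key"
  | some ts =>
    if ts = [] then "non-key"
    else
      -- for tag in tags: normalized_tags.append(tag.strip().lower())  (all elements are str)
      let normalized := ts.foldl (fun acc tag => acc ++ [PySem.Str.lower (PySem.Str.strip tag)]) []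
      -- for value in normalized_tags: if "non-key"/"non key" in value: return "non-key"
      if normalized.any pvIsNonKey then "non-key"
      -- for value in normalized_tags: if "key account" in value: return "key"
      else if normalized.any (fun v => PySem.Str.isIn "key account" v) then "key"
      else "non-key"

-- ===== PORT B =====
-- single pass carrying the found_key flag
def pvAltLoop (ts : List String) (foundKey : Bool) : String :=
  match ts with
  | [] => if foundKey then "key" else "non-key"
  | tag :: rest =>
    let value := PySem.Str.lower (PySem.Str.strip tag)
    if PySem.Str.isIn "non-key" value || PySem.Str.isIn "non key" value then "non-key"
    else pvAltLoop rest (foundKey || PySem.Str.isIn "key account" value)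

def infer_account_type_py_alt (tags : Option (List String)) : String :=
  match tags with
  | none => "non-key"
  | some ts =>
    if ts = [] then "non-key"
    else pvAltLoop ts false

-- ===== PRECONDITION & SPEC =====
def Spec_infer_account_type_py (tags : Option (List String)) (out : String) : Prop := out = infer_account_type_py_alt tags
instance (tags : Option (List String)) (out : String) : Decidable (Spec_infer_account_type_py tags out) := by unfold Spec_infer_account_type_py; infer_instance

-- ===== CLAIM (what is proved, stated in full; the proofs are below) =====
def Claim_equal_infer_account_type_py : Prop := ∀ (tags : Option (List String)), Dom_infer_account_type_py tags → Spec_infer_account_type_py tags (infer_account_type_py tags)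

-- ===== LEMMAS AND PROOFS =====

def pvNorm (t : String) : String := PySem.Str.lower (PySem.Str.strip t)

-- B's single pass computes exactly A's two-scan result over the normalized tags.
theorem pvAltLoop_eq (ts : List String) (foundKey : Bool) :
    pvAltLoop ts foundKey =
      if (ts.map pvNorm).any pvIsNonKey then "non-key"
      else if foundKey || (ts.map pvNorm).any (fun v => PySem.Str.isIn "key account" v) then "key"
      else "non-key" := by
  induction ts generalizing foundKey with
  | nil => cases foundKey <;> rfl
  | cons t rest ih =>
    simp only [pvAltLoop, List.map_cons, List.any_cons, pvNorm, pvIsNonKey]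
    cases h1 : PySem.Str.isIn "non-key" (PySem.Str.lower (PySem.Str.strip t)) <;>
    cases h2 : PySem.Str.isIn "non key" (PySem.Str.lower (PySem.Str.strip t)) <;>
      simp only [Bool.false_or, Bool.true_or, Bool.or_false, Bool.or_true,
        Bool.or_assoc, ih] <;>
      simp only [Bool.false_eq_true, if_false, if_true] <;> rfl

-- ===== VERDICT (by name: the statement is the Claim_ definition above) =====
theorem infer_account_type_py_spec : Claim_equal_infer_account_type_py := by
  intro tags _
  unfold Spec_infer_account_type_py infer_account_type_py infer_account_type_py_alt
  match tags with
  | none => rfl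
  | some ts =>
    by_cases hts : ts = []
    · simp [hts]
    · simp only [hts, if_false]
      rw [pvAltLoop_eq, PySem.List.foldl_append_singleton_eq_map]
      rfl
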